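-- pv_equiv track=rewrite | github.com/AstroLis/test-maker | tree_bool_tm.py | FilterMarkForm
-- ===== SOURCE A (Python) =====
-- def SumNForms(ff,knf):
--  if knf:
--    r=pow(2,16)-1
--  else:
--    r=0
--  for f in ff:
--   if knf:
--    r=r&f
--   else:
--    r=r|f
--  return r
--
-- def FilterMarkForm(mf,n,knf):
--   rez=mf
--   for i in range(4,0,-1):
--    for f in list(rez.keys()):
--     if(len(rez[f])==i):
--      ff={f2:rez[f2] for f2 in rez if not f2==f}
--      if SumNForms(ff,knf)==n:
--       del rez[f]
--   return rez
-- ===== SOURCE B (Python) =====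
-- # Prefix/suffix AND-OR scan: each all-except-one combination is answered in O(1)
-- # from a suffix table and a running prefix of surviving keys, instead of rebuilding
-- # and re-folding the rest of the dict for every candidate.  Like A, this deletes
-- # the filtered keys from the caller's dict in place.
-- def FilterMarkForm(mf, n, knf):
--     ident = (1 << 16) - 1 if knf else 0
--     comb = (lambda a, b: a & b) if knf else (lambda a, b: a | b)
--     for i in range(4, 0, -1):
--         keys = list(mf.keys())
--         suf = [ident]
--         for k in reversed(keys):
--             suf.append(comb(k, suf[-1]))
--         suf.reverse()
--         pre = ident
--         for f, rest in zip(keys, suf[1:]):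
--             if len(mf[f]) == i and comb(pre, rest) == n:
--                 del mf[f]
--             else:
--                 pre = comb(pre, f)
--     return mf
-- ===== Notes on version B (the rewrite author's own statement) =====
-- stated objective: faster
-- what changed: Instead of rebuilding the all-except-one dict and re-folding AND/OR over all other keys for every candidate (O(K) per query), B precomputes a suffix table of AND/OR combinations once per pass and scans with a running prefix over the surviving keys, answering each all-except-one query in O(1).
import Mathlib
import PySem

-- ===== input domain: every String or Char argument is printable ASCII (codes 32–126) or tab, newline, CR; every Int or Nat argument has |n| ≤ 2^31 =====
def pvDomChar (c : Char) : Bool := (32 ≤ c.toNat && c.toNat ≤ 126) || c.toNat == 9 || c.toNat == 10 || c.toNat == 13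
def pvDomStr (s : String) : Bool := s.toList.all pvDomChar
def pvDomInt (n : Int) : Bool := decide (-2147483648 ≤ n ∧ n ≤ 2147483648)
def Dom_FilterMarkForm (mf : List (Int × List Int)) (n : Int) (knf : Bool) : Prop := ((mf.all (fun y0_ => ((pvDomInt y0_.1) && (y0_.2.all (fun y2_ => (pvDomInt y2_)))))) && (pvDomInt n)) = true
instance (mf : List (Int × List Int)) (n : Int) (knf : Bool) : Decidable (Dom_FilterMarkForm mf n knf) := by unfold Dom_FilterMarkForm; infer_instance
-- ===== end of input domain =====

-- B answers each all-except-one AND/OR from a per-pass suffix table and a running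
-- prefix over the surviving keys, instead of rebuilding and re-folding the rest of
-- the dict for every candidate key.  Like A, the Python B deletes the filtered keys
-- from the caller's dict in place (the same deletions); the equivalence proved here
-- is about the returned dict.

-- ===== PORT A =====
def SumNForms (ff : PySem.Dict Int (List Int)) (knf : Bool) : Int :=
  let r : Int := if knf then 2 ^ 16 - 1 else 0
  ff.keys.foldl (fun r f => if knf then PySem.Int.band r f else PySem.Int.bor r f) r

def pvStepA (n : Int) (knf : Bool) (i : Int) (rez : PySem.Dict Int (List Int)) (f : Int) :
    PySem.Dict Int (List Int) :=
  if ((rez.getD f []).length : Int) == i then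
    let ff : PySem.Dict Int (List Int) :=
      PySem.Dict.ofList ((rez.keys.filter (fun f2 => !(f2 == f))).map (fun f2 => (f2, rez.getD f2 [])))
    if SumNForms ff knf == n then rez.erase f else rez
  else rez

def FilterMarkForm (mf : List (Int × List Int)) (n : Int) (knf : Bool) : List (Int × List Int) :=
  let rez := PySem.Dict.mk mf
  ((PySem.List.pyRange 4 0 (-1)).foldl
    (fun rez i => (rez.keys).foldl (pvStepA n knf i) rez) rez).items

-- ===== PORT B =====
-- Source B's suffix loop (append comb(k, suf[-1]) over reversed(keys), then reverse):
-- the same list of combined values, built by the equivalent structural recursion.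
def pvSuffix (comb : Int → Int → Int) (ident : Int) : List Int → List Int
  | [] => [ident]
  | k :: ks =>
    let s := pvSuffix comb ident ks
    comb k (s.headD ident) :: s

def pvStepB (n : Int) (comb : Int → Int → Int) (i : Int)
    (st : PySem.Dict Int (List Int) × Int) (p : Int × Int) :
    PySem.Dict Int (List Int) × Int :=
  if (((st.1.getD p.1 []).length : Int) == i) && (comb st.2 p.2 == n) then
    (st.1.erase p.1, st.2)
  else (st.1, comb st.2 p.1)

def FilterMarkForm_alt (mf : List (Int × List Int)) (n : Int) (knf : Bool) : List (Int × List Int) :=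
  let ident : Int := if knf then (1 <<< 16) - 1 else 0
  let comb : Int → Int → Int :=
    if knf then (fun a b => PySem.Int.band a b) else (fun a b => PySem.Int.bor a b)
  let d0 := PySem.Dict.mk mf
  ((PySem.List.pyRange 4 0 (-1)).foldl
    (fun d _i =>
      let keys := d.keys
      let suf := pvSuffix comb ident keys
      ((keys.zip suf.tail).foldl (pvStepB n comb _i) (d, ident)).1) d0).items

-- ===== PRECONDITION & SPEC =====
-- The association list stands for a Python dict, whose keys are unique: Pre_ admits
-- exactly the lists that represent a dict A can actually be called on (it excludes no
-- input that the Python function accepts, since a dict cannot carry duplicate keys).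
def Pre_FilterMarkForm (mf : List (Int × List Int)) (n : Int) (knf : Bool) : Prop :=
  (mf.map Prod.fst).Nodup
instance (mf : List (Int × List Int)) (n : Int) (knf : Bool) : Decidable (Pre_FilterMarkForm mf n knf) := by
  unfold Pre_FilterMarkForm; infer_instance

def pvWitness_FilterMarkForm : (List (Int × List Int)) × Int × Bool :=
  ([(3, [1, 2]), (-5, [7]), (6, [])], 7, false)

def Spec_FilterMarkForm (mf : List (Int × List Int)) (n : Int) (knf : Bool) (out : List (Int × List Int)) : Prop := out = FilterMarkForm_alt mf n knf
instance (mf : List (Int × List Int)) (n : Int) (knf : Bool) (out : List (Int × List Int)) : Decidable (Spec_FilterMarkForm mf n knf out) := by unfold Spec_FilterMarkForm; infer_instance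

-- ===== CLAIM (what is proved, stated in full; the proofs are below) =====
def Claim_equal_FilterMarkForm : Prop := ∀ (mf : List (Int × List Int)) (n : Int) (knf : Bool), Dom_FilterMarkForm mf n knf → Pre_FilterMarkForm mf n knf → Spec_FilterMarkForm mf n knf (FilterMarkForm mf n knf)

-- ===== LEMMAS AND PROOFS =====

-- ---------- Int extensionality by testBit ----------
theorem pv_add_eq_or_of_and_eq_zero (a b : ℕ) (h : a &&& b = 0) : a + b = a ||| b := by
  induction a using Nat.strong_induction_on generalizing b with
  | _ a ih =>
    rcases Nat.eq_zero_or_pos a with rfl | hpos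
    · simp
    · have h2 : a / 2 &&& b / 2 = 0 := by rw [← Nat.and_div_two, h]
      have ih2 := ih (a / 2) (Nat.div_lt_self hpos (by norm_num)) (b / 2) h2
      have hm : a % 2 &&& b % 2 = 0 := by
        have h1 : (a &&& b) % 2 ^ 1 = a % 2 ^ 1 &&& b % 2 ^ 1 := Nat.and_mod_two_pow
        rw [h] at h1; simpa using h1.symm
      have horm : (a ||| b) % 2 = a % 2 ||| b % 2 := by
        have h1 : (a ||| b) % 2 ^ 1 = a % 2 ^ 1 ||| b % 2 ^ 1 := Nat.or_mod_two_pow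
        simpa using h1
      have hor2 : (a ||| b) / 2 = a / 2 ||| b / 2 := Nat.or_div_two
      have e1 := Nat.div_add_mod (a ||| b) 2
      rcases Nat.mod_two_eq_zero_or_one a with h4 | h4 <;>
        rcases Nat.mod_two_eq_zero_or_one b with h5 | h5
      · have hv : (a ||| b) % 2 = 0 := by rw [horm, h4, h5]; decide
        omega
      · have hv : (a ||| b) % 2 = 1 := by rw [horm, h4, h5]; decide
        omega
      · have hv : (a ||| b) % 2 = 1 := by rw [horm, h4, h5]; decide
        omega
      · rw [h4, h5] at hm
        exact absurd hm (by decide)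

theorem pv_ldiff_add_and (n m : ℕ) : Nat.ldiff n m + (n &&& m) = n := by
  have hdis : Nat.ldiff n m &&& (n &&& m) = 0 := by
    apply Nat.eq_of_testBit_eq
    intro i
    simp [Nat.testBit_and, Nat.testBit_ldiff, Nat.zero_testBit]
    cases n.testBit i <;> cases m.testBit i <;> simp
  rw [pv_add_eq_or_of_and_eq_zero _ _ hdis]
  apply Nat.eq_of_testBit_eq
  intro i
  simp [Nat.testBit_or, Nat.testBit_and, Nat.testBit_ldiff]
  cases n.testBit i <;> cases m.testBit i <;> simp

theorem pv_sub_and (n m : ℕ) : n - (n &&& m) = Nat.ldiff n m := by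
  have := pv_ldiff_add_and n m; omega

theorem pv_bor_eq_lor (a b : Int) : PySem.Int.bor a b = Int.lor a b := by
  rcases a with m | m <;> rcases b with n | n <;>
    simp [PySem.Int.bor, Int.lor, Int.negSucc_eq, pv_sub_and] <;> omega

theorem pv_band_eq_land (a b : Int) : PySem.Int.band a b = Int.land a b := by
  rcases a with m | m <;> rcases b with n | n <;>
    simp [PySem.Int.band, Int.land, Int.negSucc_eq, pv_sub_and] <;> omega

theorem pv_testBit_bor (a b : Int) (k : Nat) :
    (PySem.Int.bor a b).testBit k = (a.testBit k || b.testBit k) := by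
  rw [pv_bor_eq_lor]; exact Int.testBit_lor a b k

theorem pv_testBit_band (a b : Int) (k : Nat) :
    (PySem.Int.band a b).testBit k = (a.testBit k && b.testBit k) := by
  rw [pv_band_eq_land]; exact Int.testBit_land a b k

theorem pv_int_ext (a b : Int) (h : ∀ i, a.testBit i = b.testBit i) : a = b := by
  rcases a with m | m <;> rcases b with k | k
  · exact congrArg Int.ofNat (Nat.eq_of_testBit_eq fun i => h i)
  · exfalso
    have h1 := h (m + k)
    have hm : m.testBit (m + k) = false :=
      Nat.testBit_eq_false_of_lt (lt_of_lt_of_le (Nat.lt_two_pow_self)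
        (Nat.pow_le_pow_right (by norm_num) (by omega)))
    have hk : k.testBit (m + k) = false :=
      Nat.testBit_eq_false_of_lt (lt_of_lt_of_le (Nat.lt_two_pow_self)
        (Nat.pow_le_pow_right (by norm_num) (by omega)))
    have h2 : (Int.ofNat m).testBit (m + k) = m.testBit (m + k) := rfl
    have h3 : (Int.negSucc k).testBit (m + k) = !k.testBit (m + k) := rfl
    rw [h2, h3, hm, hk] at h1
    exact absurd h1 (by decide)
  · exfalso
    have h1 := h (m + k)
    have hm : m.testBit (m + k) = false :=
      Nat.testBit_eq_false_of_lt (lt_of_lt_of_le (Nat.lt_two_pow_self)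
        (Nat.pow_le_pow_right (by norm_num) (by omega)))
    have hk : k.testBit (m + k) = false :=
      Nat.testBit_eq_false_of_lt (lt_of_lt_of_le (Nat.lt_two_pow_self)
        (Nat.pow_le_pow_right (by norm_num) (by omega)))
    have h2 : (Int.ofNat k).testBit (m + k) = k.testBit (m + k) := rfl
    have h3 : (Int.negSucc m).testBit (m + k) = !m.testBit (m + k) := rfl
    rw [h2, h3, hm, hk] at h1
    exact absurd h1 (by decide)
  · refine congrArg Int.negSucc (Nat.eq_of_testBit_eq fun i => ?_)
    have h1 := h i
    have h2 : (Int.negSucc m).testBit i = !m.testBit i := rfl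
    have h3 : (Int.negSucc k).testBit i = !k.testBit i := rfl
    rw [h2, h3] at h1
    exact Bool.not_inj h1

-- ---------- fold characterisations by testBit ----------
theorem pv_foldl_bor_testBit (ks : List Int) (acc : Int) (b : Nat) :
    (ks.foldl PySem.Int.bor acc).testBit b = (acc.testBit b || ks.any (fun k => k.testBit b)) := by
  induction ks generalizing acc with
  | nil => simp
  | cons k ks ih => simp [List.foldl_cons, ih, pv_testBit_bor, Bool.or_assoc]

theorem pv_foldr_bor_testBit (ks : List Int) (acc : Int) (b : Nat) :
    (ks.foldr PySem.Int.bor acc).testBit b = (acc.testBit b || ks.any (fun k => k.testBit b)) := by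
  induction ks with
  | nil => simp
  | cons k ks ih =>
    simp [List.foldr_cons, pv_testBit_bor, ih]
    cases acc.testBit b <;> cases k.testBit b <;> simp

theorem pv_foldl_band_testBit (ks : List Int) (acc : Int) (b : Nat) :
    (ks.foldl PySem.Int.band acc).testBit b = (acc.testBit b && ks.all (fun k => k.testBit b)) := by
  induction ks generalizing acc with
  | nil => simp
  | cons k ks ih => simp [List.foldl_cons, ih, pv_testBit_band, Bool.and_assoc]

theorem pv_foldr_band_testBit (ks : List Int) (acc : Int) (b : Nat) :
    (ks.foldr PySem.Int.band acc).testBit b = (acc.testBit b && ks.all (fun k => k.testBit b)) := by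
  induction ks with
  | nil => simp
  | cons k ks ih =>
    simp [List.foldr_cons, pv_testBit_band, ih]
    cases acc.testBit b <;> cases k.testBit b <;> simp

-- the one combination fact the scan rests on: prefix ∘ suffix = fold of the concatenation
theorem pv_split_bor (l1 l2 : List Int) (acc : Int) :
    PySem.Int.bor (l1.foldl PySem.Int.bor acc) (l2.foldr PySem.Int.bor acc)
      = (l1 ++ l2).foldl PySem.Int.bor acc := by
  apply pv_int_ext
  intro b
  rw [pv_testBit_bor, pv_foldl_bor_testBit, pv_foldr_bor_testBit, pv_foldl_bor_testBit,
    List.any_append]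
  cases acc.testBit b <;> cases (l1.any (fun k => k.testBit b)) <;> simp

theorem pv_split_band (l1 l2 : List Int) (acc : Int) :
    PySem.Int.band (l1.foldl PySem.Int.band acc) (l2.foldr PySem.Int.band acc)
      = (l1 ++ l2).foldl PySem.Int.band acc := by
  apply pv_int_ext
  intro b
  rw [pv_testBit_band, pv_foldl_band_testBit, pv_foldr_band_testBit, pv_foldl_band_testBit,
    List.all_append]
  cases acc.testBit b <;> cases (l1.all (fun k => k.testBit b)) <;> simp

-- ---------- dict-key plumbing ----------
theorem pv_map_fst_filter (l : List (Int × List Int)) (f : Int) :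
    (l.filter (fun p => !(p.1 == f))).map Prod.fst = (l.map Prod.fst).filter (fun x => !(x == f)) := by
  induction l with
  | nil => simp
  | cons p ps ih => by_cases hc : p.1 = f <;> simp [hc, ih]

theorem pv_keys_erase (d : PySem.Dict Int (List Int)) (f : Int) :
    (d.erase f).keys = d.keys.filter (fun f2 => !(f2 == f)) := by
  show ((d.items.filter (fun p => !(p.1 == f))).map Prod.fst) = _
  rw [pv_map_fst_filter]
  rfl

theorem pv_keys_ofList_fresh (os : List Int) (v : Int → List Int) (hnd : os.Nodup) :
    (PySem.Dict.ofList (os.map (fun f2 => (f2, v f2)))).keys = os := by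
  show ((os.map (fun f2 => (f2, v f2))).foldl (fun d p => d.insert p.1 p.2) PySem.Dict.empty).keys = os
  rw [List.foldl_map]
  have h := PySem.Dict.items_foldl_insert_fresh (l := os) (k := fun a => a) (v := fun a => v a)
    (d := PySem.Dict.empty) (by intro a _; rfl) (by simpa using hnd)
  show (_ : PySem.Dict Int (List Int)).items.map Prod.fst = os
  rw [h]
  simp [PySem.Dict.empty]
  exact List.map_id os

theorem pv_filter_middle (sb todo : List Int) (f : Int) (hnd : (sb ++ f :: todo).Nodup) :
    (sb ++ f :: todo).filter (fun f2 => !(f2 == f)) = sb ++ todo := by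
  have h1 : f ∉ sb := fun hf => (List.disjoint_of_nodup_append hnd) hf (by simp)
  have h2 : f ∉ todo := by
    have := (List.nodup_append.mp hnd).2.1
    exact (List.nodup_cons.mp this).1
  rw [List.filter_append, List.filter_cons]
  have hff : ¬ ((!(f == f)) = true) := by simp
  rw [if_neg hff]
  have hsb : sb.filter (fun f2 => !(f2 == f)) = sb :=
    List.filter_eq_self.mpr (fun a ha => by simp; exact fun he => h1 (he ▸ ha))
  have htd : todo.filter (fun f2 => !(f2 == f)) = todo :=
    List.filter_eq_self.mpr (fun a ha => by simp; exact fun he => h2 (he ▸ ha))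
  rw [hsb, htd]

theorem pv_suffix_cons (comb : Int → Int → Int) (ident : Int) (l : List Int) :
    pvSuffix comb ident l = (pvSuffix comb ident l).headD ident :: (pvSuffix comb ident l).tail := by
  cases l <;> rfl

theorem pv_suffix_head (comb : Int → Int → Int) (ident : Int) (l : List Int) :
    (pvSuffix comb ident l).headD ident = l.foldr comb ident := by
  induction l with
  | nil => rfl
  | cons k ks ih =>
    rw [show pvSuffix comb ident (k :: ks)
        = comb k ((pvSuffix comb ident ks).headD ident) :: pvSuffix comb ident ks from rfl,
      List.headD_cons, List.foldr_cons, ih]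

-- ---------- the inner scan, simulated in lockstep ----------
theorem pv_inner (n : Int) (knf : Bool) (i : Int)
    (comb : Int → Int → Int) (ident : Int)
    (hcomb : comb = if knf then (fun a b => PySem.Int.band a b) else (fun a b => PySem.Int.bor a b))
    (hident : ident = if knf then ((1 <<< 16 : Nat) : Int) - 1 else 0)
    (todo sb : List Int) (d : PySem.Dict Int (List Int))
    (hkeys : d.keys = sb ++ todo) (hnd : d.keys.Nodup) :
    ((todo.zip (pvSuffix comb ident todo).tail).foldl (pvStepB n comb i)
        (d, sb.foldl comb ident)).1
      = todo.foldl (pvStepA n knf i) d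
    ∧ ∃ sb', (todo.foldl (pvStepA n knf i) d).keys = sb'
        ∧ ((todo.zip (pvSuffix comb ident todo).tail).foldl (pvStepB n comb i)
            (d, sb.foldl comb ident)).2 = sb'.foldl comb ident := by
  induction todo generalizing sb d with
  | nil =>
    refine ⟨rfl, sb, ?_, rfl⟩
    simpa using hkeys
  | cons f todo ih =>
    have hzip : (f :: todo).zip (pvSuffix comb ident (f :: todo)).tail
        = (f, (pvSuffix comb ident todo).headD ident)
            :: todo.zip (pvSuffix comb ident todo).tail := by
      show (f :: todo).zip (pvSuffix comb ident todo) = _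
      rw [pv_suffix_cons comb ident todo]
      rfl
    rw [hzip, List.foldl_cons, List.foldl_cons]
    have hndm : (sb ++ f :: todo).Nodup := hkeys ▸ hnd
    -- the two guards agree
    have hff : f ∉ sb ++ todo := by
      intro hf
      rcases List.mem_append.mp hf with h | h
      · exact (List.disjoint_of_nodup_append hndm) h (by simp)
      · exact (List.nodup_cons.mp (List.nodup_append.mp hndm).2.1).1 h
    have hffkeys :
        (PySem.Dict.ofList ((d.keys.filter (fun f2 => !(f2 == f))).map
          (fun f2 => (f2, d.getD f2 [])))).keys = sb ++ todo := by
      rw [hkeys, pv_filter_middle sb todo f hndm]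
      exact pv_keys_ofList_fresh _ _ (by
        rw [← pv_filter_middle sb todo f hndm]
        exact hndm.filter _)
    have hsum :
        SumNForms (PySem.Dict.ofList ((d.keys.filter (fun f2 => !(f2 == f))).map
            (fun f2 => (f2, d.getD f2 [])))) knf
          = comb (sb.foldl comb ident) ((pvSuffix comb ident todo).headD ident) := by
      rw [pv_suffix_head]
      show ((PySem.Dict.ofList _).keys.foldl
          (fun r f => if knf then PySem.Int.band r f else PySem.Int.bor r f)
          (if knf then 2 ^ 16 - 1 else 0)) = _
      rw [hffkeys]
      have hid : (if knf then (2 : Int) ^ 16 - 1 else 0) = ident := by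
        rw [hident]; cases knf
        · rfl
        · decide
      rw [hid]
      cases knf
      · subst hcomb
        simp only [Bool.false_eq_true, if_false]
        exact (pv_split_bor sb todo ident).symm
      · subst hcomb
        simp only [if_true]
        exact (pv_split_band sb todo ident).symm
    unfold pvStepA pvStepB
    dsimp only
    by_cases hlen : ((((d.getD f []).length : Int) == i) = true)
    · rw [if_pos hlen]
      by_cases hval :
          ((SumNForms (PySem.Dict.ofList ((d.keys.filter (fun f2 => !(f2 == f))).map
            (fun f2 => (f2, d.getD f2 [])))) knf == n) = true)
      · -- both delete f; pre is unchanged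
        rw [if_pos hval]
        have hg : ((((d.getD f []).length : Int) == i)
            && (comb (sb.foldl comb ident) ((pvSuffix comb ident todo).headD ident) == n)) = true := by
          rw [hlen, ← hsum, hval]; rfl
        rw [if_pos hg]
        apply ih sb (d.erase f)
        · rw [pv_keys_erase, hkeys, pv_filter_middle sb todo f hndm]
        · rw [pv_keys_erase, hkeys, pv_filter_middle sb todo f hndm]
          have hn2 : ((sb ++ f :: todo).filter (fun f2 => !(f2 == f))).Nodup := hndm.filter _
          rw [pv_filter_middle sb todo f hndm] at hn2
          exact hn2
      · -- both keep f; pre absorbs it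
        rw [if_neg hval]
        have hg : ¬ (((((d.getD f []).length : Int) == i)
            && (comb (sb.foldl comb ident) ((pvSuffix comb ident todo).headD ident) == n)) = true) := by
          rw [hlen, ← hsum]
          simpa using hval
        rw [if_neg hg]
        have hpre : comb (sb.foldl comb ident) f = (sb ++ [f]).foldl comb ident := by
          rw [List.foldl_append]; rfl
        rw [hpre]
        apply ih (sb ++ [f]) d
        · rw [hkeys, List.append_assoc]; rfl
        · exact hnd
    · rw [if_neg hlen]
      have hg : ¬ (((((d.getD f []).length : Int) == i)
          && (comb (sb.foldl comb ident) ((pvSuffix comb ident todo).headD ident) == n)) = true) := by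
        simp only [Bool.and_eq_true]
        exact fun hc => hlen hc.1
      rw [if_neg hg]
      have hpre : comb (sb.foldl comb ident) f = (sb ++ [f]).foldl comb ident := by
        rw [List.foldl_append]; rfl
      rw [hpre]
      apply ih (sb ++ [f]) d
      · rw [hkeys, List.append_assoc]; rfl
      · exact hnd

theorem pv_nodup_step (n : Int) (knf : Bool) (i : Int) (todo : List Int)
    (d : PySem.Dict Int (List Int)) (hnd : d.keys.Nodup) :
    (todo.foldl (pvStepA n knf i) d).keys.Nodup := by
  induction todo generalizing d with
  | nil => exact hnd
  | cons f todo ih =>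
    rw [List.foldl_cons]
    apply ih
    unfold pvStepA
    dsimp only
    split_ifs
    · rw [pv_keys_erase]; exact hnd.filter _
    · exact hnd
    · exact hnd

theorem pv_outer (n : Int) (knf : Bool)
    (comb : Int → Int → Int) (ident : Int)
    (hcomb : comb = if knf then (fun a b => PySem.Int.band a b) else (fun a b => PySem.Int.bor a b))
    (hident : ident = if knf then ((1 <<< 16 : Nat) : Int) - 1 else 0)
    (is : List Int) (d : PySem.Dict Int (List Int)) (hnd : d.keys.Nodup) :
    is.foldl (fun d i =>
        ((d.keys.zip (pvSuffix comb ident d.keys).tail).foldl (pvStepB n comb i) (d, ident)).1) d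
      = is.foldl (fun rez i => (rez.keys).foldl (pvStepA n knf i) rez) d := by
  induction is generalizing d with
  | nil => rfl
  | cons i is ih =>
    rw [List.foldl_cons, List.foldl_cons]
    have h1 := pv_inner n knf i comb ident hcomb hident d.keys [] d (by simp) hnd
    have h2 : ([] : List Int).foldl comb ident = ident := rfl
    rw [h2] at h1
    rw [h1.1]
    exact ih _ (pv_nodup_step n knf i d.keys d hnd)

theorem pv_main (mf : List (Int × List Int)) (n : Int) (knf : Bool)
    (hpre : (mf.map Prod.fst).Nodup) :
    FilterMarkForm mf n knf = FilterMarkForm_alt mf n knf := by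
  unfold FilterMarkForm FilterMarkForm_alt
  dsimp only
  have hnd : (PySem.Dict.mk mf).keys.Nodup := hpre
  exact congrArg PySem.Dict.items
    (pv_outer n knf
      (if knf then (fun a b => PySem.Int.band a b) else (fun a b => PySem.Int.bor a b))
      (if knf then ((1 <<< 16 : Nat) : Int) - 1 else 0) rfl rfl
      (PySem.List.pyRange 4 0 (-1)) (PySem.Dict.mk mf) hnd).symm

-- ===== VERDICT (by name: the statement is the Claim_ definition above) =====
theorem FilterMarkForm_spec : Claim_equal_FilterMarkForm := by
  intro mf n knf _ hpre
  exact pv_main mf n knf hpre
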